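/- GENERATED by mk_final_copies.py from the proof of the farm's unit `start_decoder.C9c` (farm:start_decoder.C9c.1: Lemmas.lean) as the
   re-elaboration sweep compiled it — do not edit. -/
import Asan.CheckWalk
import Vorbis.Spec.Units.start_decoder_C9c
import Vorbis.Spec.StartDecoderCarry

open X86 X86.User Asan Vorbis Vorbis.Spec Vorbis.Spec.StartDecoder

set_option maxRecDepth 100000
set_option maxHeartbeats 4000000

namespace Vorbis.Spec.start_decoder_C9c

/-- A window of segment C9c: the stack below the steady rsp (the pushed return addresses of the check calls and of `error`, `error`'s
frame), the byte `lookup_type` of the struct `[c + 25, c + 26)`, `f->error` `[f + 140, f + 144)` (and `lo < hi`: an empty window placed inside the struct would spoil the field equations). -/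
def C9cWin (g : Ghost) (c : Nat) (w : Span) : Prop :=
  w.lo < w.hi ∧
    ((g.R - 408 ≤ w.lo ∧ w.hi ≤ g.R) ∨ (c + 25 ≤ w.lo ∧ w.hi ≤ c + 26) ∨ (g.f + 140 ≤ w.lo ∧ w.hi ≤ g.f + 144))

/-- **THE INVARIANT SIDE OF SEGMENT C9c, once for all its exits**: from `InC9b` at `v` and ANY later memory `m'` that differs from
`v.mem` only in windows `C9cWin` (no shadow byte): `MInv`, `cb(i)` unmoved, K1 – K5, lookup_values = multiplicands = 0. -/
theorem c9c_carry {u₀ : State} {g : Ghost} {i : Nat} {A2 A3 Ai : Arena} {A : Arena × List Obj} {v : State} {c : Nat}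
    {m' : Mem} {ws : List Span} (h : InC9b u₀ g i A2 A3 Ai A v) (hc : g.cb v.mem i = c) (hs : Mem.SameExcept ws v.mem m')
    (hun : ShadowUntouched v.mem m') (hok : ∀ w, w ∈ ws → C9cWin g c w) :
    MInv g i A2 A3 Ai A m' ∧ g.cb m' i = c ∧ K15 (Since Ai A.1) m' c ∧ Codebook.lookup_values m' c = 0 ∧
      Codebook.multiplicands m' c = 0 := by
  have hpos : Pos g A := Pos.of h.frame h.cur
  have hm0 : MInv g i A2 A3 Ai A v.mem := MInv.of h.frame h.cur
  have hcw := hm0.c_where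
  rw [hc] at hcw
  have p1 := hpos.r_eq
  have p2 := hpos.ra_lo
  have p3 := hpos.ra_hi
  have p7 := hpos.objOut
  have p11 := hpos.ar_stack
  have hq : ∀ w, w ∈ ws → OkWin0 g c w := by
    intro w hw
    have k := (hok w hw).2
    unfold OkWin0
    rcases k with k | k | k
    · left
      exact k
    · right; right; right; left
      omega
    · right; right; right; right; right; right; left
      omega
  have hb : Bits (g.Blk A) g.len m' g.f := by
    apply bits_kept hpos hm0.sd.bits hs
    intro w hw
    have k := hok w hw
    unfold C9cWin at k
    omega
  obtain ⟨hm2, hcb2⟩ := hm0.step hpos hc hs hun (fun w hw => (hq w hw).ok) hb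
  have hflds : BookFields v.mem m' c := by
    apply BookFields.of_step0 hm0 hpos hc hs hq
    intro w hw h1 h2
    have k := hok w hw
    unfold C9cWin at k
    omega
  have efh : Mem.EqOn (c + 48) (c + 2096) v.mem m' := by
    apply hs.eqOn
    intro w hw
    have k := hok w hw
    unfold C9cWin at k
    omega
  have hk := h.k
  have hfresh := h.fresh
  rw [hc] at hk hfresh
  have hsv : 1 ≤ Codebook.sorted_entries v.mem c → (Codebook.svBlock v.mem c).Kept v.mem m' := by
    intro hse
    exact young_kept0 hm0 hpos hs (by rw [hc]; exact hq) (hk.k4.sv hse)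
  refine ⟨hm2, hcb2, hk.of_fields hflds (by omega) efh hsv, ?_, ?_⟩
  · rw [hflds.lookup_values]
    exact hfresh.lookup_values
  · rw [hflds.multiplicands]
    exact hfresh.multiplicands

/-- **Exit 0x114788 (`AtC10 i`): lookup_type = 0**: the book is finished (K6 from the type and `multiplicands = 0`); `Cur.toSD4`
closes the iteration. `s`: the state at the exit; `hm`, `hk`, `hmu`: `c9c_carry` for its memory. -/
theorem c9c_exit_C10 {u₀ : State} {g : Ghost} {i : Nat} {A2 A3 Ai : Arena} {A : Arena × List Obj} {v s : State} {c : Nat}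
    (h : InC9b u₀ g i A2 A3 Ai A v) (hm : MInv g i A2 A3 Ai A s.mem) (hcb : g.cb s.mem i = c)
    (hk : K15 (Since Ai A.1) s.mem c) (hmu : Codebook.multiplicands s.mem c = 0) (hlt : Codebook.lookup_type s.mem c = 0)
    (hrip : s.rip = pc_C10) (hrsp : s.reg .rsp = addr g.R) (hcode : CodeOK u₀ s.mem) (hinv : abiInv s)
    (hr14 : s.reg .r14 = addr c) : AtC10 u₀ g i s := by
  have hcur : Cur g i A2 A3 Ai A s := hm.cur h.cur.hand (by rw [hcb]; exact hr14)
  have k6 : Codebook.K6 (Since Ai A.1) s.mem c :=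
    ⟨Or.inl hlt, fun h2 => absurd (hlt.symm.trans h2) (by decide), fun h2 => absurd (hlt.symm.trans h2) (by decide),
      fun _ => hmu⟩
  have hok : CodebookOK (Since Ai A.1) s.mem (g.cb s.mem i) := by
    rw [hcb]
    exact hk.toOK k6
  obtain ⟨hsd, hages⟩ := hcur.toSD4 h.noTemps hok
  exact ⟨A,
    { frame := hm.frame h.frame hrip hrsp hcode hinv h.frame.offText h.frame.ext
      hand := h.cur.hand
      slot_f := hm.slot_f
      slot_i := hm.slot_i
      sd := hsd
      ages := ⟨A2, A3, hages⟩ }⟩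

/-- **Exit 0x114bad (`AtC11 i`): lookup_type ∈ {1, 2}** and FIX 3's product test passed. -/
theorem c9c_exit_C11 {u₀ : State} {g : Ghost} {i : Nat} {A2 A3 Ai : Arena} {A : Arena × List Obj} {v s : State} {c : Nat}
    (h : InC9b u₀ g i A2 A3 Ai A v) (hm : MInv g i A2 A3 Ai A s.mem) (hcb : g.cb s.mem i = c)
    (hk : K15 (Since Ai A.1) s.mem c) (hlv : Codebook.lookup_values s.mem c = 0) (hmu : Codebook.multiplicands s.mem c = 0)
    (hlt : Codebook.lookup_type s.mem c = 1 ∨ Codebook.lookup_type s.mem c = 2)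
    (hprod : Codebook.entries s.mem c * Codebook.dimensions s.mem c ≤ 0x1FFFFFFF)
    (hrip : s.rip = pc_C11) (hrsp : s.reg .rsp = addr g.R) (hcode : CodeOK u₀ s.mem) (hinv : abiInv s)
    (hr14 : s.reg .r14 = addr c) : AtC11 u₀ g i s := by
  refine ⟨A, A2, A3, Ai, ?_⟩
  exact
    { frame := hm.frame h.frame hrip hrsp hcode hinv h.frame.offText h.frame.ext
      cur := hm.cur h.cur.hand (by rw [hcb]; exact hr14)
      k := by rw [hcb]; exact hk
      type_12 := by rw [hcb]; exact hlt
      prod_le := by rw [hcb]; exact hprod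
      noTemps := h.noTemps
      lv0 := by rw [hcb]; exact hlv
      mu0 := by rw [hcb]; exact hmu }

/-- **Exits 0x114b91 / 0x114ba8 (`AtC9d`): `error` has returned** (rax = 0): SD.ERR by `Cur.failed`. -/
theorem c9c_exit_err {u₀ : State} {g : Ghost} {i : Nat} {A2 A3 Ai : Arena} {A : Arena × List Obj} {v s : State} {c : Nat}
    (h : InC9b u₀ g i A2 A3 Ai A v) (hm : MInv g i A2 A3 Ai A s.mem) (hcb : g.cb s.mem i = c)
    (hrip : s.rip = L.start_decoder.cut147 ∨ s.rip = L.start_decoder.cut148) (hrsp : s.reg .rsp = addr g.R)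
    (hcode : CodeOK u₀ s.mem) (hinv : abiInv s) (hr14 : s.reg .r14 = addr c) (hrax : s.reg .rax = 0) : AtC9d u₀ g s := by
  have hcur : Cur g i A2 A3 Ai A s := hm.cur h.cur.hand (by rw [hcb]; exact hr14)
  refine ⟨A, ?_⟩
  refine { frame := ?_, hand := h.cur.hand, rax := hrax, failed := hcur.failed }
  rcases hrip with hr | hr
  · exact Or.inl (hm.frame h.frame hr hrsp hcode hinv h.frame.offText h.frame.ext)
  · exact Or.inr (hm.frame h.frame hr hrsp hcode hinv h.frame.offText h.frame.ext)

end Vorbis.Spec.start_decoder_C9c
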